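-- pv_equiv track=rewrite | github.com/lorenzoscottb/Dream_Reports_Annotation | Data/dreambank_xlm_to_dataset.py | get_dreamer_emotions
-- ===== SOURCE A (Python) =====
-- def get_dreamer_emotions(emot_dict):
--     EMOTIONS = []
--
--     for chrct, emtns in emot_dict.items():
--         if chrct == 'D':
--             EMOTIONS.extend(emtns)
--         else:
--             continue
--
--     if EMOTIONS == []:
--         return 'Missing'
--     else:
--         return ('_').join(EMOTIONS)
-- ===== SOURCE B (Python) =====
-- def get_dreamer_emotions(emot_dict):
--     joined = None
--     for chrct, emtns in emot_dict.items():
--         if chrct == 'D':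
--             for e in emtns:
--                 joined = e if joined is None else joined + '_' + e
--     return 'Missing' if joined is None else joined
-- ===== Notes on version B (the rewrite author's own statement) =====
-- stated objective: alternative
-- what changed: Instead of accumulating matching emotions into a list and joining it at the end, B folds the items into an Optional string accumulator, concatenating each emotion with '_' as it is seen, so no intermediate list and no join call exist.
import Mathlib
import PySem

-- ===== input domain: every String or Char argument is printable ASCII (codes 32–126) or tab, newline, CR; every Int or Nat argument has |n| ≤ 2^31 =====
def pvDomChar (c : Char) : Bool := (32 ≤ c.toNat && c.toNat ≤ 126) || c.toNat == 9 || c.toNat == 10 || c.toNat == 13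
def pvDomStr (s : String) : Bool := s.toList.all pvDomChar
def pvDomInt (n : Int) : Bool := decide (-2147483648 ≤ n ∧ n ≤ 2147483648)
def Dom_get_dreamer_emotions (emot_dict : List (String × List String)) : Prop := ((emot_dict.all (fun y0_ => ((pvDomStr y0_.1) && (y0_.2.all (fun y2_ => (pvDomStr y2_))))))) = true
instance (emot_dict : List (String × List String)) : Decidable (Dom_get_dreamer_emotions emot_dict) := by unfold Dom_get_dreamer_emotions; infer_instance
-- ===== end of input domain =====

-- B replaces A's list-accumulate-then-join by a single pass that concatenates the joined
-- string directly into an Optional-string accumulator (alternative decomposition, same cost).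

-- ===== PORT A =====
def get_dreamer_emotions (emot_dict : List (String × List String)) : String :=
  let EMOTIONS : List String :=
    emot_dict.foldl (fun acc p => if p.1 == "D" then acc ++ p.2 else acc) []
  if EMOTIONS == [] then "Missing" else PySem.Str.join "_" EMOTIONS

-- ===== PORT B =====
def get_dreamer_emotions_alt (emot_dict : List (String × List String)) : String :=
  let joined : Option String :=
    emot_dict.foldl (fun acc p =>
      if p.1 == "D" then
        p.2.foldl (fun a e =>
          match a with
          | none => some e
          | some s => some (s ++ "_" ++ e)) acc
      else acc) none
  match joined with
  | none => "Missing"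
  | some s => s

-- ===== PRECONDITION & SPEC =====
def Spec_get_dreamer_emotions (emot_dict : List (String × List String)) (out : String) : Prop := out = get_dreamer_emotions_alt emot_dict
instance (emot_dict : List (String × List String)) (out : String) : Decidable (Spec_get_dreamer_emotions emot_dict out) := by unfold Spec_get_dreamer_emotions; infer_instance

-- ===== CLAIM (what is proved, stated in full; the proofs are below) =====
def Claim_equal_get_dreamer_emotions : Prop := ∀ (emot_dict : List (String × List String)), Dom_get_dreamer_emotions emot_dict → Spec_get_dreamer_emotions emot_dict (get_dreamer_emotions emot_dict)

-- ===== LEMMAS AND PROOFS =====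

-- The value of B's accumulator after having seen exactly the emotions of list L.
def pvOptJoin (L : List String) : Option String :=
  match L with
  | [] => none
  | _ :: _ => some (PySem.Str.join "_" L)

theorem join_append_singleton (l : List String) (x : String) (h : l ≠ []) :
    PySem.Str.join "_" (l ++ [x]) = PySem.Str.join "_" l ++ "_" ++ x := by
  apply String.toList_injective
  simp only [PySem.Str.join, String.toList_ofList, String.toList_append]
  induction l with
  | nil => simp at h
  | cons b t ih =>
    cases t with
    | nil => simp [PySem.Chars.join_cons_cons, PySem.Chars.join_singleton]
    | cons c t2 =>
      simp only [List.cons_append, List.map_cons, PySem.Chars.join_cons_cons] at *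
      rw [ih (by simp)]
      simp [List.append_assoc]

theorem join_singleton (x : String) : PySem.Str.join "_" [x] = x := by
  apply String.toList_injective
  simp [PySem.Str.join, PySem.Chars.join_singleton]

theorem optJoin_step (L : List String) (e : String) :
    (match pvOptJoin L with
      | none => some e
      | some s => some (s ++ "_" ++ e)) = pvOptJoin (L ++ [e]) := by
  cases L with
  | nil => simp [pvOptJoin, join_singleton]
  | cons x t =>
    show some (PySem.Str.join "_" (x :: t) ++ "_" ++ e) = some (PySem.Str.join "_" (x :: (t ++ [e])))
    rw [← List.cons_append, join_append_singleton (x :: t) e (by simp)]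

theorem inner_fold (es L : List String) :
    es.foldl (fun a e =>
      match a with
      | none => some e
      | some s => some (s ++ "_" ++ e)) (pvOptJoin L) = pvOptJoin (L ++ es) := by
  induction es generalizing L with
  | nil => simp
  | cons e t ih =>
    rw [List.foldl_cons, optJoin_step L e, ih (L ++ [e])]
    simp

theorem outer_fold (d : List (String × List String)) (L : List String) :
    d.foldl (fun acc p =>
      if p.1 == "D" then
        p.2.foldl (fun a e =>
          match a with
          | none => some e
          | some s => some (s ++ "_" ++ e)) acc
      else acc) (pvOptJoin L) =
    pvOptJoin (d.foldl (fun acc p => if p.1 == "D" then acc ++ p.2 else acc) L) := by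
  induction d generalizing L with
  | nil => rfl
  | cons p t ih =>
    simp only [List.foldl_cons]
    by_cases hk : (p.1 == "D") = true
    · rw [if_pos hk, if_pos hk, inner_fold p.2 L, ih (L ++ p.2)]
    · rw [if_neg hk, if_neg hk, ih L]

-- ===== VERDICT (by name: the statement is the Claim_ definition above) =====
theorem get_dreamer_emotions_spec : Claim_equal_get_dreamer_emotions := by
  intro d _
  unfold Spec_get_dreamer_emotions get_dreamer_emotions get_dreamer_emotions_alt
  have h := outer_fold d []
  rw [show (pvOptJoin [] : Option String) = none from rfl] at h
  rw [h]
  generalize (d.foldl (fun acc p => if p.1 == "D" then acc ++ p.2 else acc) []) = L0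
  cases L0 with
  | nil => rfl
  | cons x xs => rfl
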